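-- pv_equiv track=rewrite | github.com/vamsikrishna07/Amazon-OA | numIdleDrives.py | numIdleDrives
-- ===== SOURCE A (Python) =====
-- from collections import defaultdict
-- from bisect import bisect_left, bisect_right
--
-- def numIdleDrives(x, y):
--     n = len(x)
--     xm = defaultdict(list)
--     ym = defaultdict(list)
--
--     for i in range(n):
--         xm[y[i]].append(x[i])
--         ym[x[i]].append(y[i])
--
--     for key in xm:
--         xm[key].sort()
--
--     for key in ym:
--         ym[key].sort()
--
--     count = 0
--     for i in range(n):
--         cx, cy = x[i], y[i]
--         r = xm[cy]
--         s = ym[cx]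
--
--         above = bisect_right(r, cx) < len(r)
--         below = bisect_left(r, cx) > 0
--         left = bisect_right(s, cy) < len(s)
--         right = bisect_left(s, cy) > 0
--
--         if above and below and left and right:
--             count += 1
--
--     return count
-- ===== SOURCE B (Python) =====
-- def numIdleDrives(x, y):
--     rmin = {}; rmax = {}; cmin = {}; cmax = {}
--     for px, py in zip(x, y):
--         if py not in rmin or px < rmin[py]: rmin[py] = px
--         if py not in rmax or px > rmax[py]: rmax[py] = px
--         if px not in cmin or py < cmin[px]: cmin[px] = py
--         if px not in cmax or py > cmax[px]: cmax[px] = py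
--     return sum(1 for px, py in zip(x, y)
--                if rmin[py] < px < rmax[py] and cmin[px] < py < cmax[px])
-- ===== Notes on version B (the rewrite author's own statement) =====
-- stated objective: faster
-- what changed: Replaces the per-row/per-column sorted lists with bisect queries by one pass that keeps only min/max x per row and min/max y per column, then counts points strictly between those extrema.
import Mathlib
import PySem

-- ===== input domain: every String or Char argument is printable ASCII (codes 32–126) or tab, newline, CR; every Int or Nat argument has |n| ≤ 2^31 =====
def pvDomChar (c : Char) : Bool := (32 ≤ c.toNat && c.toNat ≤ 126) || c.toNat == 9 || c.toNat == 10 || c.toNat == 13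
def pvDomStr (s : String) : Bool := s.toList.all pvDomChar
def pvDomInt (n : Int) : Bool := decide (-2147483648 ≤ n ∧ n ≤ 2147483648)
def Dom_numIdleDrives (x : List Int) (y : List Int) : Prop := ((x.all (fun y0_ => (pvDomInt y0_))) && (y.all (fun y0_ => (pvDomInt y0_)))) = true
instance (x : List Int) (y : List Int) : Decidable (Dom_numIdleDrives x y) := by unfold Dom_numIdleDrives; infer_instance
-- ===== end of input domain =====

-- B replaces A's per-row/column sorted lists + bisect queries by a single pass keeping
-- min/max x per row and min/max y per column (objective: faster, O(n log n) -> O(n)).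


-- ===== PORT A =====
-- xm[y[i]].append(x[i]) on a defaultdict(list): read current list (default []), append, store back
def pvAppendStep (d : PySem.Dict Int (List Int)) (k v : Int) : PySem.Dict Int (List Int) :=
  d.insert k (d.getD k [] ++ [v])

def numIdleDrives (x : List Int) (y : List Int) : Int :=
  let n : Int := PySem.List.len x
  -- for i in range(n): xm[y[i]].append(x[i]); ym[x[i]].append(y[i])
  let maps :=
    (PySem.List.pyRange 0 n).foldl
      (fun (md : PySem.Dict Int (List Int) × PySem.Dict Int (List Int)) i =>
        (pvAppendStep md.1 (PySem.List.pyGetD y i 0) (PySem.List.pyGetD x i 0),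
         pvAppendStep md.2 (PySem.List.pyGetD x i 0) (PySem.List.pyGetD y i 0)))
      (PySem.Dict.empty, PySem.Dict.empty)
  -- for key in xm: xm[key].sort()   (and likewise ym): each value list sorted in place
  let xm : PySem.Dict Int (List Int) :=
    PySem.Dict.mk (maps.1.items.map (fun p => (p.1, PySem.List.sorted p.2 (fun v => v))))
  let ym : PySem.Dict Int (List Int) :=
    PySem.Dict.mk (maps.2.items.map (fun p => (p.1, PySem.List.sorted p.2 (fun v => v))))
  (PySem.List.pyRange 0 n).foldl
    (fun count i =>
      let cx := PySem.List.pyGetD x i 0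
      let cy := PySem.List.pyGetD y i 0
      let r := xm.getD cy []
      let s := ym.getD cx []
      if PySem.List.bisectRight r cx < r.length ∧ 0 < PySem.List.bisectLeft r cx ∧
         PySem.List.bisectRight s cy < s.length ∧ 0 < PySem.List.bisectLeft s cy
      then count + 1 else count) 0

-- ===== PORT B =====
-- if k not in d or v < d[k]: d[k] = v
def pvMinStep (d : PySem.Dict Int Int) (k v : Int) : PySem.Dict Int Int :=
  if d.contains k = false ∨ v < d.getD k 0 then d.insert k v else d
-- if k not in d or v > d[k]: d[k] = v
def pvMaxStep (d : PySem.Dict Int Int) (k v : Int) : PySem.Dict Int Int :=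
  if d.contains k = false ∨ d.getD k 0 < v then d.insert k v else d

def numIdleDrives_alt (x : List Int) (y : List Int) : Int :=
  -- one pass over zip(x, y) maintaining ((rmin, rmax), (cmin, cmax))
  let st :=
    (x.zip y).foldl
      (fun (st : (PySem.Dict Int Int × PySem.Dict Int Int) ×
                 (PySem.Dict Int Int × PySem.Dict Int Int)) p =>
        ((pvMinStep st.1.1 p.2 p.1, pvMaxStep st.1.2 p.2 p.1),
         (pvMinStep st.2.1 p.1 p.2, pvMaxStep st.2.2 p.1 p.2)))
      ((PySem.Dict.empty, PySem.Dict.empty), (PySem.Dict.empty, PySem.Dict.empty))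
  -- sum(1 for px, py in zip(x, y) if rmin[py] < px < rmax[py] and cmin[px] < py < cmax[px])
  (x.zip y).foldl
    (fun c p =>
      if st.1.1.getD p.2 0 < p.1 ∧ p.1 < st.1.2.getD p.2 0 ∧
         st.2.1.getD p.1 0 < p.2 ∧ p.2 < st.2.2.getD p.1 0
      then c + 1 else c) 0

-- ===== PRECONDITION & SPEC =====
-- Pre_ excludes only mismatched lengths with y shorter than x, where A raises IndexError on y[i].
def Pre_numIdleDrives (x : List Int) (y : List Int) : Prop := x.length ≤ y.length
instance (x : List Int) (y : List Int) : Decidable (Pre_numIdleDrives x y) := by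
  unfold Pre_numIdleDrives; infer_instance

def pvWitness_numIdleDrives : List Int × List Int := ([0, 1, -1, 0, 0], [0, 0, 0, 1, -1])

def Spec_numIdleDrives (x : List Int) (y : List Int) (out : Int) : Prop := out = numIdleDrives_alt x y
instance (x : List Int) (y : List Int) (out : Int) : Decidable (Spec_numIdleDrives x y out) := by
  unfold Spec_numIdleDrives; infer_instance

-- ===== CLAIM (what is proved, stated in full; the proofs are below) =====
def Claim_equal_numIdleDrives : Prop := ∀ (x : List Int) (y : List Int), Dom_numIdleDrives x y → Pre_numIdleDrives x y → Spec_numIdleDrives x y (numIdleDrives x y)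

-- ===== LEMMAS AND PROOFS =====

-- the values stored (in order) under key k by a fold over pairs (key, value)
def pvRow (qs : List (Int × Int)) (k : Int) : List Int :=
  (qs.filter (fun q => q.1 == k)).map (·.2)

lemma pvRow_append (qs : List (Int × Int)) (q : Int × Int) (k : Int) :
    pvRow (qs ++ [q]) k = pvRow qs k ++ (if q.1 = k then [q.2] else []) := by
  have hb : (q.1 == k) = decide (q.1 = k) := rfl
  by_cases h : q.1 = k <;> simp [pvRow, List.filter_append, List.filter, hb, h]

lemma pvMem_row {qs : List (Int × Int)} {q : Int × Int} (hq : q ∈ qs) : q.2 ∈ pvRow qs q.1 := by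
  unfold pvRow
  exact List.mem_map.mpr ⟨q, List.mem_filter.mpr ⟨hq, by simp⟩, rfl⟩

lemma pvGetD_eq_get? (d : PySem.Dict Int Int) (k v : Int) : d.getD k v = (d.get? k).getD v := rfl

lemma pvGetD_eq_get?' (d : PySem.Dict Int (List Int)) (k : Int) :
    d.getD k [] = (d.get? k).getD [] := rfl

-- splitting a componentwise fold into two folds
lemma pvFoldl_pair {α β γ : Type} (l : List α) (f : β → α → β) (g : γ → α → γ) (b : β) (c : γ) :
    l.foldl (fun s a => (f s.1 a, g s.2 a)) (b, c) = (l.foldl f b, l.foldl g c) := by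
  induction l generalizing b c with
  | nil => rfl
  | cons a l ih => simp [List.foldl, ih]

-- an index loop over range(len x) reading x[i], y[i] is a loop over zip(x, y)
lemma pvFoldl_range_zip {β : Type} (x y : List Int) (h : x.length ≤ y.length)
    (f : β → Int → Int → β) (b : β) :
    (PySem.List.pyRange 0 (PySem.List.len x)).foldl
      (fun a i => f a (PySem.List.pyGetD x i 0) (PySem.List.pyGetD y i 0)) b
    = (x.zip y).foldl (fun a p => f a p.1 p.2) b := by
  have hlen : (x.zip y).length = x.length := by
    simp [List.length_zip]; omega
  have h1 : PySem.List.len x = PySem.List.len (x.zip y) := by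
    simp [PySem.List.len, hlen]
  rw [h1, PySem.List.foldl_congr_mem _ _
    (fun a i => (fun (a : β) (p : Int × Int) => f a p.1 p.2) a
      (PySem.List.pyGetD (x.zip y) i (0, 0))) b ?_]
  · simpa using PySem.List.foldl_pyRange_pyGetD (x.zip y) (0, 0)
      (fun a p => f a p.1 p.2) b (a := 0) le_rfl
  · intro acc i hi
    rw [PySem.List.mem_pyRange_one] at hi
    have hx : i < (x.length : Int) := by
      have := hi.2; simp [PySem.List.len, hlen] at this; exact this
    have hy : i < (y.length : Int) := by omega
    have hz : i < ((x.zip y).length : Int) := by omega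
    show f acc (PySem.List.pyGetD x i 0) (PySem.List.pyGetD y i 0)
      = f acc (PySem.List.pyGetD (x.zip y) i (0, 0)).1 (PySem.List.pyGetD (x.zip y) i (0, 0)).2
    rw [PySem.List.pyGetD_eq_getElem _ _ hi.1 hz,
        PySem.List.pyGetD_eq_getElem _ _ hi.1 hx,
        PySem.List.pyGetD_eq_getElem _ _ hi.1 hy]
    simp [List.getElem_zip]

-- A's grouping fold: the list stored under k is exactly pvRow
lemma pvAppend_fold_getD (qs : List (Int × Int)) (d : PySem.Dict Int (List Int)) (k : Int) :
    (qs.foldl (fun d q => pvAppendStep d q.1 q.2) d).getD k [] = d.getD k [] ++ pvRow qs k := by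
  induction qs generalizing d with
  | nil => simp [pvRow]
  | cons a qs ih =>
    rw [List.foldl_cons, ih]
    by_cases hk : k = a.1
    · subst hk
      simp [pvAppendStep, pvGetD_eq_get?', pvRow, List.filter]
    · have : (pvAppendStep d a.1 a.2).getD k [] = d.getD k [] := by
        simp [pvAppendStep, pvGetD_eq_get?', PySem.Dict.get?_insert_of_ne _ _ hk]
      rw [this]
      have hne : ¬ (a.1 == k) = true := by simpa using fun h => hk (by simp [h])
      simp [pvRow, List.filter, hne]

-- get? of a dict whose values are sorted in place
lemma pvSorted_dict_get? (items : List (Int × List Int)) (k : Int) :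
    (PySem.Dict.mk (items.map (fun p => (p.1, PySem.List.sorted p.2 (fun v => v))))).get? k
    = ((PySem.Dict.mk items).get? k).map (fun l => PySem.List.sorted l (fun v => v)) := by
  induction items with
  | nil => simp [PySem.Dict.get?]
  | cons a items ih =>
    obtain ⟨k1, v1⟩ := a
    simp only [List.map_cons, PySem.Dict.get?_mk_cons]
    split_ifs <;> simp [ih]

lemma pvSorted_dict_getD (d : PySem.Dict Int (List Int)) (k : Int) :
    (PySem.Dict.mk (d.items.map (fun p => (p.1, PySem.List.sorted p.2 (fun v => v))))).getD k []
    = PySem.List.sorted (d.getD k []) (fun v => v) := by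
  rw [pvGetD_eq_get?', pvSorted_dict_get?]
  cases hd : (PySem.Dict.mk d.items).get? k with
  | none =>
    have : d.get? k = none := hd
    simp [pvGetD_eq_get?', this, (PySem.List.sorted_eq_nil_iff ([] : List Int) (fun v => v) false).mpr rfl]
  | some l =>
    have : d.get? k = some l := hd
    simp [pvGetD_eq_get?', this]

-- bisect characterisations on a sorted list
lemma pvBisectRight_lt_iff (r : List Int) (h : r.Pairwise (· ≤ ·)) (v : Int) :
    PySem.List.bisectRight r v < r.length ↔ ∃ e ∈ r, v < e := by
  obtain ⟨hle, h1, h2⟩ := PySem.List.bisectRight_spec r v h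
  constructor
  · intro hlt
    exact ⟨r[PySem.List.bisectRight r v], List.getElem_mem _, h2 _ hlt le_rfl⟩
  · rintro ⟨e, he, hv⟩
    by_contra hge
    have hge' : r.length ≤ PySem.List.bisectRight r v := Nat.le_of_not_lt hge
    obtain ⟨j, hj, rfl⟩ := List.getElem_of_mem he
    exact absurd hv (not_lt.mpr (h1 j hj (lt_of_lt_of_le hj hge')))

lemma pvBisectLeft_pos_iff (r : List Int) (h : r.Pairwise (· ≤ ·)) (v : Int) :
    0 < PySem.List.bisectLeft r v ↔ ∃ e ∈ r, e < v := by
  obtain ⟨hle, h1, h2⟩ := PySem.List.bisectLeft_spec r v h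
  constructor
  · intro hpos
    have hlen : 0 < r.length := lt_of_lt_of_le hpos hle
    exact ⟨r[0], List.getElem_mem _, h1 0 hlen hpos⟩
  · rintro ⟨e, he, hv⟩
    obtain ⟨j, hj, rfl⟩ := List.getElem_of_mem he
    by_contra hz
    have hz' : PySem.List.bisectLeft r v = 0 := Nat.eq_zero_of_not_pos hz
    exact absurd (h2 j hj (by omega)) (not_le.mpr hv)

-- B's min fold: the stored value is a minimum of pvRow
lemma pvMin_fold_get? (qs : List (Int × Int)) (k : Int) :
    (match (qs.foldl (fun d q => pvMinStep d q.1 q.2) PySem.Dict.empty).get? k with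
     | none => pvRow qs k = []
     | some m => m ∈ pvRow qs k ∧ ∀ e ∈ pvRow qs k, m ≤ e) := by
  induction qs using List.reverseRecOn with
  | nil => simp [pvRow, PySem.Dict.get?_empty]
  | append_singleton qs q ih =>
    rw [List.foldl_append, List.foldl_cons, List.foldl_nil]
    set D := qs.foldl (fun d q => pvMinStep d q.1 q.2) PySem.Dict.empty with hD
    by_cases hk : k = q.1
    · subst hk
      cases hq : D.get? q.1 with
      | none =>
        rw [hq] at ih
        have hstep : (pvMinStep D q.1 q.2).get? q.1 = some q.2 := by
          simp [pvMinStep, PySem.Dict.contains_eq_isSome_get?, hq, PySem.Dict.get?_insert_self]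
        rw [hstep]
        simp [pvRow_append, ih]
      | some m =>
        rw [hq] at ih
        have hgd : D.getD q.1 0 = m := by rw [pvGetD_eq_get?, hq]; rfl
        have hcont : D.contains q.1 = true := by
          simp [PySem.Dict.contains_eq_isSome_get?, hq]
        by_cases hlt : q.2 < m
        · have hstep : (pvMinStep D q.1 q.2).get? q.1 = some q.2 := by
            simp [pvMinStep, hcont, hgd, hlt, PySem.Dict.get?_insert_self]
          rw [hstep, pvRow_append]
          constructor
          · simp
          · intro e he
            simp at he
            rcases he with he | he
            · exact le_of_lt (lt_of_lt_of_le hlt (ih.2 e he))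
            · omega
        · have hstep : (pvMinStep D q.1 q.2).get? q.1 = some m := by
            simp [pvMinStep, hcont, hgd, hlt, hq]
          rw [hstep, pvRow_append]
          constructor
          · simp [ih.1]
          · intro e he
            simp at he
            rcases he with he | he
            · exact ih.2 e he
            · omega
    · have hstep : (pvMinStep D q.1 q.2).get? k = D.get? k := by
        unfold pvMinStep
        split
        · exact PySem.Dict.get?_insert_of_ne _ _ hk
        · rfl
      rw [hstep, pvRow_append, if_neg (fun hh => hk hh.symm), List.append_nil]
      exact ih

-- B's max fold: the stored value is a maximum of pvRow
lemma pvMax_fold_get? (qs : List (Int × Int)) (k : Int) :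
    (match (qs.foldl (fun d q => pvMaxStep d q.1 q.2) PySem.Dict.empty).get? k with
     | none => pvRow qs k = []
     | some m => m ∈ pvRow qs k ∧ ∀ e ∈ pvRow qs k, e ≤ m) := by
  induction qs using List.reverseRecOn with
  | nil => simp [pvRow, PySem.Dict.get?_empty]
  | append_singleton qs q ih =>
    rw [List.foldl_append, List.foldl_cons, List.foldl_nil]
    set D := qs.foldl (fun d q => pvMaxStep d q.1 q.2) PySem.Dict.empty with hD
    by_cases hk : k = q.1
    · subst hk
      cases hq : D.get? q.1 with
      | none =>
        rw [hq] at ih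
        have hstep : (pvMaxStep D q.1 q.2).get? q.1 = some q.2 := by
          simp [pvMaxStep, PySem.Dict.contains_eq_isSome_get?, hq, PySem.Dict.get?_insert_self]
        rw [hstep]
        simp [pvRow_append, ih]
      | some m =>
        rw [hq] at ih
        have hgd : D.getD q.1 0 = m := by rw [pvGetD_eq_get?, hq]; rfl
        have hcont : D.contains q.1 = true := by
          simp [PySem.Dict.contains_eq_isSome_get?, hq]
        by_cases hlt : m < q.2
        · have hstep : (pvMaxStep D q.1 q.2).get? q.1 = some q.2 := by
            simp [pvMaxStep, hcont, hgd, hlt, PySem.Dict.get?_insert_self]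
          rw [hstep, pvRow_append]
          constructor
          · simp
          · intro e he
            simp at he
            rcases he with he | he
            · exact le_of_lt (lt_of_le_of_lt (ih.2 e he) hlt)
            · omega
        · have hstep : (pvMaxStep D q.1 q.2).get? q.1 = some m := by
            simp [pvMaxStep, hcont, hgd, hlt, hq]
          rw [hstep, pvRow_append]
          constructor
          · simp [ih.1]
          · intro e he
            simp at he
            rcases he with he | he
            · exact ih.2 e he
            · omega
    · have hstep : (pvMaxStep D q.1 q.2).get? k = D.get? k := by
        unfold pvMaxStep
        split
        · exact PySem.Dict.get?_insert_of_ne _ _ hk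
        · rfl
      rw [hstep, pvRow_append, if_neg (fun hh => hk hh.symm), List.append_nil]
      exact ih

-- min stored under k is < v  iff  some row value is < v   (row nonempty)
lemma pvMin_getD_lt_iff (qs : List (Int × Int)) (k v : Int) (hne : pvRow qs k ≠ []) :
    ((qs.foldl (fun d q => pvMinStep d q.1 q.2) PySem.Dict.empty).getD k 0 < v
      ↔ ∃ e ∈ pvRow qs k, e < v) := by
  have h := pvMin_fold_get? qs k
  cases hq : (qs.foldl (fun d q => pvMinStep d q.1 q.2) PySem.Dict.empty).get? k with
  | none => rw [hq] at h; exact absurd h hne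
  | some m =>
    rw [hq] at h
    rw [pvGetD_eq_get?, hq]
    simp only [Option.getD_some]
    constructor
    · intro hm; exact ⟨m, h.1, hm⟩
    · rintro ⟨e, he, hev⟩; exact lt_of_le_of_lt (h.2 e he) hev

lemma pvMax_getD_gt_iff (qs : List (Int × Int)) (k v : Int) (hne : pvRow qs k ≠ []) :
    (v < (qs.foldl (fun d q => pvMaxStep d q.1 q.2) PySem.Dict.empty).getD k 0
      ↔ ∃ e ∈ pvRow qs k, v < e) := by
  have h := pvMax_fold_get? qs k
  cases hq : (qs.foldl (fun d q => pvMaxStep d q.1 q.2) PySem.Dict.empty).get? k with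
  | none => rw [hq] at h; exact absurd h hne
  | some m =>
    rw [hq] at h
    rw [pvGetD_eq_get?, hq]
    simp only [Option.getD_some]
    constructor
    · intro hm; exact ⟨m, h.1, hm⟩
    · rintro ⟨e, he, hev⟩; exact lt_of_lt_of_le hev (h.2 e he)

-- A's per-point condition, reduced to existentials over the raw row
lemma pvA_cond_iff (qs : List (Int × Int)) (d : PySem.Dict Int (List Int)) (k v : Int)
    (hd : d.getD k [] = pvRow qs k) :
    let r := (PySem.Dict.mk (d.items.map (fun p => (p.1, PySem.List.sorted p.2 (fun v => v))))).getD k []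
    ((PySem.List.bisectRight r v < r.length ∧ 0 < PySem.List.bisectLeft r v)
      ↔ ((∃ e ∈ pvRow qs k, v < e) ∧ (∃ e ∈ pvRow qs k, e < v))) := by
  intro r
  have hr : r = PySem.List.sorted (pvRow qs k) (fun v => v) := by
    show (PySem.Dict.mk (d.items.map (fun p => (p.1, PySem.List.sorted p.2 (fun v => v))))).getD k []
      = PySem.List.sorted (pvRow qs k) (fun v => v)
    rw [pvSorted_dict_getD, hd]
  have hp : r.Pairwise (· ≤ ·) := by
    rw [hr]
    simpa using PySem.List.sorted_pairwise (pvRow qs k) (fun v => v)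
  rw [pvBisectRight_lt_iff r hp v, pvBisectLeft_pos_iff r hp v]
  constructor
  · rintro ⟨⟨e1, he1, h1⟩, ⟨e2, he2, h2⟩⟩
    rw [hr, PySem.List.mem_sorted] at he1 he2
    exact ⟨⟨e1, he1, h1⟩, ⟨e2, he2, h2⟩⟩
  · rintro ⟨⟨e1, he1, h1⟩, ⟨e2, he2, h2⟩⟩
    rw [← PySem.List.mem_sorted (pvRow qs k) (fun v => v) false, ← hr] at he1 he2
    exact ⟨⟨e1, he1, h1⟩, ⟨e2, he2, h2⟩⟩

-- ===== VERDICT (by name: the statement is the Claim_ definition above) =====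
theorem numIdleDrives_spec : Claim_equal_numIdleDrives := by
  intro x y _ hPre
  unfold Spec_numIdleDrives numIdleDrives numIdleDrives_alt
  simp only []
  rw [pvFoldl_range_zip x y hPre
      (fun (md : PySem.Dict Int (List Int) × PySem.Dict Int (List Int)) cx cy =>
        (pvAppendStep md.1 cy cx, pvAppendStep md.2 cx cy)) (PySem.Dict.empty, PySem.Dict.empty)]
  rw [pvFoldl_pair (x.zip y) (fun d (p : Int × Int) => pvAppendStep d p.2 p.1)
      (fun d (p : Int × Int) => pvAppendStep d p.1 p.2) PySem.Dict.empty PySem.Dict.empty]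
  rw [pvFoldl_pair (x.zip y)
      (fun (s : PySem.Dict Int Int × PySem.Dict Int Int) (p : Int × Int) =>
        (pvMinStep s.1 p.2 p.1, pvMaxStep s.2 p.2 p.1))
      (fun (s : PySem.Dict Int Int × PySem.Dict Int Int) (p : Int × Int) =>
        (pvMinStep s.1 p.1 p.2, pvMaxStep s.2 p.1 p.2))
      (PySem.Dict.empty, PySem.Dict.empty) (PySem.Dict.empty, PySem.Dict.empty)]
  rw [pvFoldl_pair (x.zip y) (fun d (p : Int × Int) => pvMinStep d p.2 p.1)
      (fun d (p : Int × Int) => pvMaxStep d p.2 p.1) PySem.Dict.empty PySem.Dict.empty]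
  rw [pvFoldl_pair (x.zip y) (fun d (p : Int × Int) => pvMinStep d p.1 p.2)
      (fun d (p : Int × Int) => pvMaxStep d p.1 p.2) PySem.Dict.empty PySem.Dict.empty]
  set ps := x.zip y with hps
  set XA := ps.foldl (fun d (p : Int × Int) => pvAppendStep d p.2 p.1) PySem.Dict.empty with hXA
  set YA := ps.foldl (fun d (p : Int × Int) => pvAppendStep d p.1 p.2) PySem.Dict.empty with hYA
  set RMIN := ps.foldl (fun d (p : Int × Int) => pvMinStep d p.2 p.1) PySem.Dict.empty with hRMIN
  set RMAX := ps.foldl (fun d (p : Int × Int) => pvMaxStep d p.2 p.1) PySem.Dict.empty with hRMAX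
  set CMIN := ps.foldl (fun d (p : Int × Int) => pvMinStep d p.1 p.2) PySem.Dict.empty with hCMIN
  set CMAX := ps.foldl (fun d (p : Int × Int) => pvMaxStep d p.1 p.2) PySem.Dict.empty with hCMAX
  set XS := PySem.Dict.mk (XA.items.map (fun p => (p.1, PySem.List.sorted p.2 (fun v => v)))) with hXS
  set YS := PySem.Dict.mk (YA.items.map (fun p => (p.1, PySem.List.sorted p.2 (fun v => v)))) with hYS
  rw [pvFoldl_range_zip x y hPre
      (fun (count : Int) cx cy =>
        if PySem.List.bisectRight (XS.getD cy []) cx < (XS.getD cy []).length ∧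
           0 < PySem.List.bisectLeft (XS.getD cy []) cx ∧
           PySem.List.bisectRight (YS.getD cx []) cy < (YS.getD cx []).length ∧
           0 < PySem.List.bisectLeft (YS.getD cx []) cy
        then count + 1 else count) 0]
  apply PySem.List.foldl_congr_mem
  intro acc p hp
  have hswap : ∀ (f : PySem.Dict Int (List Int) → Int → Int → PySem.Dict Int (List Int)),
      ps.foldl (fun d p => f d p.2 p.1) PySem.Dict.empty
      = (ps.map (fun p => (p.2, p.1))).foldl (fun d q => f d q.1 q.2) PySem.Dict.empty := by
    intro f; rw [List.foldl_map]
  have hswap2 : ∀ (f : PySem.Dict Int Int → Int → Int → PySem.Dict Int Int),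
      ps.foldl (fun d p => f d p.2 p.1) PySem.Dict.empty
      = (ps.map (fun p => (p.2, p.1))).foldl (fun d q => f d q.1 q.2) PySem.Dict.empty := by
    intro f; rw [List.foldl_map]
  set sw := ps.map (fun p => (p.2, p.1)) with hsw
  have hpx : p.1 ∈ pvRow sw p.2 := by
    have hm : (p.2, p.1) ∈ sw := by
      rw [hsw]; exact List.mem_map.mpr ⟨p, hp, rfl⟩
    simpa using pvMem_row hm
  have hpy : p.2 ∈ pvRow ps p.1 := by
    have hm : (p.1, p.2) ∈ ps := by simpa using hp
    simpa using pvMem_row hm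
  have hneR : pvRow sw p.2 ≠ [] := fun h => by simp [h] at hpx
  have hneC : pvRow ps p.1 ≠ [] := fun h => by simp [h] at hpy
  have hArow := pvA_cond_iff sw XA p.2 p.1
      (by rw [hXA, hswap (fun d a b => pvAppendStep d a b)]
          simpa using pvAppend_fold_getD sw PySem.Dict.empty p.2)
  have hAcol := pvA_cond_iff ps YA p.1 p.2
      (by rw [hYA]; simpa using pvAppend_fold_getD ps PySem.Dict.empty p.1)
  rw [← hXS] at hArow
  rw [← hYS] at hAcol
  simp only [] at hArow hAcol
  have hBrmin : (RMIN.getD p.2 0 < p.1 ↔ ∃ e ∈ pvRow sw p.2, e < p.1) := by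
    rw [hRMIN, hswap2 (fun d a b => pvMinStep d a b)]
    simpa using pvMin_getD_lt_iff sw p.2 p.1 hneR
  have hBrmax : (p.1 < RMAX.getD p.2 0 ↔ ∃ e ∈ pvRow sw p.2, p.1 < e) := by
    rw [hRMAX, hswap2 (fun d a b => pvMaxStep d a b)]
    simpa using pvMax_getD_gt_iff sw p.2 p.1 hneR
  have hBcmin : (CMIN.getD p.1 0 < p.2 ↔ ∃ e ∈ pvRow ps p.1, e < p.2) := by
    rw [hCMIN]; simpa using pvMin_getD_lt_iff ps p.1 p.2 hneC
  have hBcmax : (p.2 < CMAX.getD p.1 0 ↔ ∃ e ∈ pvRow ps p.1, p.2 < e) := by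
    rw [hCMAX]; simpa using pvMax_getD_gt_iff ps p.1 p.2 hneC
  refine if_congr ?_ rfl rfl
  constructor
  · rintro ⟨h1, h2, h3, h4⟩
    have hr := hArow.mp ⟨h1, h2⟩
    have hc := hAcol.mp ⟨h3, h4⟩
    exact ⟨hBrmin.mpr hr.2, hBrmax.mpr hr.1, hBcmin.mpr hc.2, hBcmax.mpr hc.1⟩
  · rintro ⟨h1, h2, h3, h4⟩
    have hr := hArow.mpr ⟨hBrmax.mp h2, hBrmin.mp h1⟩
    have hc := hAcol.mpr ⟨hBcmax.mp h4, hBcmin.mp h3⟩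
    exact ⟨hr.1, hr.2, hc.1, hc.2⟩
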